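-- pv_equiv track=rewrite | github.com/einavcohen/Artificial-Intelligence | py_ex2.py | get_attribute_values_counting_dicts
-- ===== SOURCE A (Python) =====
-- def get_classifications(data):
--     return [x[-1] for x in data]
--
-- def _update_counting_dict(counting_dict, classification):
--     if classification in counting_dict.keys():
--         counting_dict[classification] += 1
--
-- def _initialize_counting_dict(classifications):
--     counting_dict = {}
--     for classification in classifications:
--         counting_dict[classification] = 0
--     return counting_dict
--
-- def get_attribute_values_counting_dicts(attribute_index, examples):
--     classifications = set(get_classifications(examples))
--
--     attribute_values_counting_dicts = {}
--     for example in examples: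
--         attribute_value = example[attribute_index]
--
--         if attribute_value not in attribute_values_counting_dicts.keys():
--             attribute_values_counting_dicts[attribute_value] = _initialize_counting_dict(classifications)
--
--         _update_counting_dict(attribute_values_counting_dicts[attribute_value], example[-1])
--     return attribute_values_counting_dicts
-- ===== SOURCE B (Python) =====
-- def get_attribute_values_counting_dicts(attribute_index, examples):
--     # Stage 1: first-appearance lists of attribute values and of classifications.
--     values = []
--     for example in examples:
--         if example[attribute_index] not in values:
--             values.append(example[attribute_index])
--     labels = []
--     for example in examples:
--         if example[-1] not in labels:
--             labels.append(example[-1])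
--     # Stage 2: brute-force count each (value, label) cell by a fresh scan of examples.
--     return {v: {c: sum(1 for ex in examples
--                        if ex[attribute_index] == v and ex[-1] == c)
--                 for c in labels}
--             for v in values}
-- ===== Notes on version B (the rewrite author's own statement) =====
-- stated objective: alternative
-- what changed: A makes one incremental pass that keeps a dict of per-attribute-value counter dicts and increments them; B never maintains counters during a pass: it first collects the distinct attribute values and distinct classifications, then fills each (value, classification) cell of the grid by an independent brute-force scan of the examples.
import Mathlib
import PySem

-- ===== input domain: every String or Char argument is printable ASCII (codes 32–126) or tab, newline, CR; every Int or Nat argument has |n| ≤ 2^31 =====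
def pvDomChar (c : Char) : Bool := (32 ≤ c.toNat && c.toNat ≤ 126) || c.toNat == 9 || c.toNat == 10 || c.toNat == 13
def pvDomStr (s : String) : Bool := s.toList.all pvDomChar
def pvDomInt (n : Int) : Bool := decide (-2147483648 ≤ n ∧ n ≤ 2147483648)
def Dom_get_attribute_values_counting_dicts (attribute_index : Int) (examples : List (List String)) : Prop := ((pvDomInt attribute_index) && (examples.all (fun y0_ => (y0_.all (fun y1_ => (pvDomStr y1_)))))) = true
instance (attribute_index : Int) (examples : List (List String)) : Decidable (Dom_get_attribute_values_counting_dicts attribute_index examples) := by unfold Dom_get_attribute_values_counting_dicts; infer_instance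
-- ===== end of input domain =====

-- B replaces A's single incremental pass with a dict of counter dicts by two first-appearance
-- dedup passes followed by an independent brute-force scan of the examples for every
-- (attribute value, classification) cell (objective: alternative algorithm, same result).

-- ===== PORT A =====
def pvGetClassifications (data : List (List String)) : List String :=
  data.map (fun x => PySem.List.pyGetD x (-1) "")

def pvUpdateCountingDict (counting_dict : PySem.Dict String Int) (classification : String) : PySem.Dict String Int :=
  if counting_dict.contains classification then counting_dict.modify classification 0 (· + 1)
  else counting_dict

def pvInitializeCountingDict (classifications : List String) : PySem.Dict String Int :=
  classifications.foldl (fun d c => d.insert c (0 : Int)) PySem.Dict.empty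

def get_attribute_values_counting_dicts (attribute_index : Int) (examples : List (List String)) : List (String × List (String × Int)) :=
  let classifications : PySem.Set String := PySem.Set.ofList (pvGetClassifications examples)
  let avcd : PySem.Dict String (PySem.Dict String Int) :=
    examples.foldl (fun avcd ex =>
      let attribute_value := PySem.List.pyGetD ex attribute_index ""
      let avcd := if avcd.contains attribute_value then avcd
                  else avcd.insert attribute_value (pvInitializeCountingDict classifications)
      -- in-place mutation of the stored inner dict, modelled by modify (the key is present)
      avcd.modify attribute_value PySem.Dict.empty
        (fun cd => pvUpdateCountingDict cd (PySem.List.pyGetD ex (-1) "")))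
      PySem.Dict.empty
  avcd.items.map (fun p => (p.1, p.2.items))

-- ===== PORT B =====
def get_attribute_values_counting_dicts_alt (attribute_index : Int) (examples : List (List String)) : List (String × List (String × Int)) :=
  -- stage 1: first-appearance lists of attribute values and classifications
  let values := examples.foldl (fun (acc : List String) ex_ =>
      let a := PySem.List.pyGetD ex_ attribute_index ""
      if acc.contains a then acc else acc ++ [a]) []
  let labels := examples.foldl (fun (acc : List String) ex_ =>
      let c := PySem.List.pyGetD ex_ (-1) ""
      if acc.contains c then acc else acc ++ [c]) []
  -- stage 2: each cell counted by its own scan of examples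
  values.map (fun v => (v, labels.map (fun c => (c,
    examples.foldl (fun (n : Int) ex =>
      if PySem.List.pyGetD ex attribute_index "" == v && PySem.List.pyGetD ex (-1) "" == c
      then n + 1 else n) 0))))

-- ===== PRECONDITION & SPEC =====
-- Pre_ excludes exactly the inputs where Python A raises IndexError: an ex that is empty
-- (ex[-1]) or too short for attribute_index (ex[attribute_index]).
def Pre_get_attribute_values_counting_dicts (attribute_index : Int) (examples : List (List String)) : Prop :=
  ∀ e ∈ examples, PySem.Raise.InRange e.length attribute_index
instance (attribute_index : Int) (examples : List (List String)) : Decidable (Pre_get_attribute_values_counting_dicts attribute_index examples) := by unfold Pre_get_attribute_values_counting_dicts; infer_instance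

def pvWitness_get_attribute_values_counting_dicts : Int × List (List String) :=
  (0, [["sunny", "yes"], ["rain", "no"], ["sunny", "no"]])

def Spec_get_attribute_values_counting_dicts (attribute_index : Int) (examples : List (List String)) (out : List (String × List (String × Int))) : Prop := out = get_attribute_values_counting_dicts_alt attribute_index examples
instance (attribute_index : Int) (examples : List (List String)) (out : List (String × List (String × Int))) : Decidable (Spec_get_attribute_values_counting_dicts attribute_index examples out) := by unfold Spec_get_attribute_values_counting_dicts; infer_instance

-- ===== CLAIM (what is proved, stated in full; the proofs are below) =====
def Claim_equal_get_attribute_values_counting_dicts : Prop := ∀ (attribute_index : Int) (examples : List (List String)), Dom_get_attribute_values_counting_dicts attribute_index examples → Pre_get_attribute_values_counting_dicts attribute_index examples → Spec_get_attribute_values_counting_dicts attribute_index examples (get_attribute_values_counting_dicts attribute_index examples)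

-- ===== LEMMAS AND PROOFS =====

-- B's per-cell count over a prefix p
def pvCnt (attribute_index : Int) (p : List (List String)) (a c : String) : Int :=
  p.foldl (fun (n : Int) ex =>
    if PySem.List.pyGetD ex attribute_index "" == a && PySem.List.pyGetD ex (-1) "" == c
    then n + 1 else n) 0

lemma pvCnt_append_singleton (attribute_index : Int) (p : List (List String)) (e : List String) (a c : String) :
    pvCnt attribute_index (p ++ [e]) a c
      = if PySem.List.pyGetD e attribute_index "" == a && PySem.List.pyGetD e (-1) "" == c
        then pvCnt attribute_index p a c + 1 else pvCnt attribute_index p a c := by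
  simp [pvCnt, List.foldl_append]

lemma pvCnt_zero_of_absent (attribute_index : Int) (p : List (List String)) (a c : String)
    (h : ∀ e ∈ p, PySem.List.pyGetD e attribute_index "" ≠ a) :
    pvCnt attribute_index p a c = 0 := by
  induction p with
  | nil => rfl
  | cons e t ih =>
    have he : PySem.List.pyGetD e attribute_index "" ≠ a := h e (List.mem_cons_self ..)
    have : pvCnt attribute_index (e :: t) a c = pvCnt attribute_index t a c := by
      simp [pvCnt, he]
    rw [this]
    exact ih (fun e' he' => h e' (List.mem_cons_of_mem _ he'))

-- keys of an inner dict whose items are a dense grid over cls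
lemma pv_keys_of_items_map (inner : PySem.Dict String Int) (cls : List String)
    (g : String → Int) (h : inner.items = cls.map (fun c => (c, g c))) :
    inner.keys = cls := by
  simp only [PySem.Dict.keys, h, List.map_map]
  have hcomp : ((fun p : String × Int => p.1) ∘ fun c => (c, g c)) = fun c => c := rfl
  rw [hcomp, List.map_id']

-- one A-side update of a dense inner dict bumps exactly the cell of classification c
lemma pv_inner_step (cls : List String) (hnd : cls.Nodup) (c : String) (hc : c ∈ cls)
    (inner : PySem.Dict String Int) (g : String → Int)
    (h : inner.items = cls.map (fun c' => (c', g c'))) :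
    (pvUpdateCountingDict inner c).items
      = cls.map (fun c' => (c', if c' = c then g c' + 1 else g c')) := by
  have hkeys : inner.keys = cls := pv_keys_of_items_map inner cls _ h
  have hknd : inner.keys.Nodup := by rw [hkeys]; exact hnd
  have hcont : inner.contains c = true := by
    rw [PySem.Dict.contains_iff_mem_keys, hkeys]; exact hc
  have hgd : ∀ c' ∈ cls, inner.getD c' 0 = g c' := by
    intro c' hc'
    exact PySem.Dict.getD_of_mem_items inner (by rw [h]; exact List.mem_map_of_mem hc') hknd 0
  unfold pvUpdateCountingDict
  rw [if_pos hcont]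
  have hkeys' : (inner.modify c 0 (· + 1)).keys = cls := by
    rw [PySem.Dict.keys_modify, PySem.Dict.keys_insert_of_contains _ _ hcont, hkeys]
  have hknd' : (inner.modify c 0 (· + 1)).keys.Nodup := by rw [hkeys']; exact hnd
  rw [PySem.Dict.items_eq_map_keys _ hknd' 0, hkeys']
  refine List.map_congr_left (fun c' hc' => ?_)
  rw [PySem.Dict.getD_modify]
  by_cases hcc : c' = c
  · simp [hcc, hgd c hc]
  · simp [hcc, hgd c' hc']

-- the freshly initialised counting dict is the all-zero grid
lemma pv_init_items (cls : List String) (hnd : cls.Nodup) :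
    (pvInitializeCountingDict cls).items = cls.map (fun c => (c, (0 : Int))) := by
  unfold pvInitializeCountingDict
  have := PySem.Dict.items_foldl_insert_fresh cls (fun c => c) (fun _ => (0 : Int))
      (PySem.Dict.empty : PySem.Dict String Int)
      (fun a _ => PySem.Dict.contains_empty a) (by simpa using hnd)
  simpa using this

-- the loop invariant: after A has processed the prefix p, its dict holds, per first-appearance
-- attribute value of p, the dense grid over cls of B's brute-force counts over p
def pvInv (attribute_index : Int) (cls : List String) (p : List (List String))
    (D : PySem.Dict String (PySem.Dict String Int)) : Prop :=
  D.keys = PySem.Set.ofList (p.map (fun e => PySem.List.pyGetD e attribute_index "")) ∧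
  D.keys.Nodup ∧
  ∀ k ∈ D.keys, (D.getD k PySem.Dict.empty).items
    = cls.map (fun c => (c, pvCnt attribute_index p k c))

lemma pv_step_inv (attribute_index : Int) (cls : List String) (hnd : cls.Nodup)
    (p : List (List String)) (e : List String)
    (hccls : PySem.List.pyGetD e (-1) "" ∈ cls)
    (D : PySem.Dict String (PySem.Dict String Int)) (h : pvInv attribute_index cls p D) :
    pvInv attribute_index cls (p ++ [e])
      ((if D.contains (PySem.List.pyGetD e attribute_index "") then D
        else D.insert (PySem.List.pyGetD e attribute_index "") (pvInitializeCountingDict cls)).modify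
        (PySem.List.pyGetD e attribute_index "") PySem.Dict.empty
        (fun cd => pvUpdateCountingDict cd (PySem.List.pyGetD e (-1) ""))) := by
  obtain ⟨hk, hnod, hin⟩ := h
  set av := PySem.List.pyGetD e attribute_index "" with hav
  set c := PySem.List.pyGetD e (-1) "" with hcdef
  set S := PySem.Set.ofList (p.map (fun e => PySem.List.pyGetD e attribute_index "")) with hS
  have hSstep : PySem.Set.ofList ((p ++ [e]).map (fun e => PySem.List.pyGetD e attribute_index ""))
      = PySem.Set.add S av := by
    rw [hS]
    simp only [PySem.Set.ofList, List.map_append, List.foldl_append, List.map_cons, List.map_nil,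
      List.foldl_cons, List.foldl_nil]
    exact rfl
  set base := if D.contains av = true then D else D.insert av (pvInitializeCountingDict cls) with hbase
  have hcontbase : base.contains av = true := by
    by_cases hcav : D.contains av = true
    · rw [hbase, if_pos hcav]; exact hcav
    · rw [hbase, if_neg hcav]; exact PySem.Dict.contains_insert_self ..
  have hmemS : D.contains av = true ↔ av ∈ S := by
    rw [PySem.Dict.contains_iff_mem_keys, hk]
  have hkbase : base.keys = if D.contains av = true then D.keys else D.keys ++ [av] := by
    by_cases hcav : D.contains av = true
    · rw [hbase, if_pos hcav, if_pos hcav]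
    · have hcav' : D.contains av = false := Bool.eq_false_iff.mpr hcav
      rw [hbase, if_neg hcav, if_neg hcav, PySem.Dict.keys_insert_of_not_contains _ _ hcav']
  have hkD1 : (base.modify av PySem.Dict.empty (fun cd => pvUpdateCountingDict cd c)).keys
      = base.keys := by
    rw [PySem.Dict.keys_modify, PySem.Dict.keys_insert_of_contains _ _ hcontbase]
  have haddS : PySem.Set.add S av = if D.contains av = true then S else S ++ [av] := by
    by_cases hcav : D.contains av = true
    · rw [if_pos hcav, PySem.Set.add]
      have : S.contains av = true := by
        have := hmemS.mp hcav
        simpa using this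
      rw [if_pos this]
    · rw [if_neg hcav, PySem.Set.add]
      have : ¬ S.contains av = true := by
        intro hcn
        exact hcav (hmemS.mpr (by simpa using hcn))
      rw [if_neg this]
  refine ⟨?_, ?_, ?_⟩
  · rw [hkD1, hkbase, hSstep, haddS]
    by_cases hcav : D.contains av = true
    · rw [if_pos hcav, if_pos hcav, hk]
    · rw [if_neg hcav, if_neg hcav, hk]
  · rw [hkD1, hkbase]
    by_cases hcav : D.contains av = true
    · rw [if_pos hcav]; exact hnod
    · rw [if_neg hcav]
      have hnm : av ∉ D.keys := fun hm =>
        hcav ((PySem.Dict.contains_iff_mem_keys D av).mpr hm)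
      rw [List.nodup_append]
      exact ⟨hnod, List.nodup_singleton _, by
        intro a ha b hb
        rw [List.mem_singleton] at hb
        subst hb
        exact fun hab => hnm (hab ▸ ha)⟩
  · intro k hkmem
    by_cases hkav : k = av
    · rw [PySem.Dict.getD_modify, if_pos hkav, hkav]
      by_cases hcav : D.contains av = true
      · have hbg : base.getD av PySem.Dict.empty = D.getD av PySem.Dict.empty := by
          rw [hbase, if_pos hcav]
        rw [hbg]
        have hstep := pv_inner_step cls hnd c hccls _ _
          (hin av ((PySem.Dict.contains_iff_mem_keys D av).mp hcav))
        rw [hstep]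
        refine List.map_congr_left (fun c' _ => ?_)
        rw [pvCnt_append_singleton]
        by_cases hcc : c' = c
        · simp [hcc, ← hav, ← hcdef]
        · simp [← hav, ← hcdef, hcc, Ne.symm hcc]
      · have hcav' : D.contains av = false := Bool.eq_false_iff.mpr hcav
        have hbg : base.getD av PySem.Dict.empty = pvInitializeCountingDict cls := by
          rw [hbase, if_neg hcav, PySem.Dict.getD_insert, if_pos rfl]
        rw [hbg]
        have habsent : ∀ e' ∈ p, PySem.List.pyGetD e' attribute_index "" ≠ av := by
          intro e' he' heq
          apply hcav
          rw [hmemS, hS, PySem.Set.mem_ofList]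
          exact heq ▸ List.mem_map_of_mem he'
        have hstep := pv_inner_step cls hnd c hccls _ (fun _ => (0 : Int))
          (pv_init_items cls hnd)
        rw [hstep]
        refine List.map_congr_left (fun c' hc' => ?_)
        rw [pvCnt_append_singleton, pvCnt_zero_of_absent attribute_index p av c' habsent]
        by_cases hcc : c' = c
        · simp [hcc, ← hav, ← hcdef]
        · simp [← hav, ← hcdef, hcc, Ne.symm hcc]
    · have hkm' : k ∈ D.keys := by
        rw [hkD1, hkbase] at hkmem
        by_cases hcav : D.contains av = true
        · rw [if_pos hcav] at hkmem; exact hkmem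
        · rw [if_neg hcav] at hkmem
          rcases List.mem_append.mp hkmem with hmm | hmm
          · exact hmm
          · exact absurd (List.mem_singleton.mp hmm) hkav
      have hDg : (base.modify av PySem.Dict.empty (fun cd => pvUpdateCountingDict cd c)).getD k
          PySem.Dict.empty = D.getD k PySem.Dict.empty := by
        rw [PySem.Dict.getD_modify, if_neg hkav, hbase]
        by_cases hcav : D.contains av = true
        · rw [if_pos hcav]
        · rw [if_neg hcav, PySem.Dict.getD_insert, if_neg hkav]
      rw [hDg, hin k hkm']
      refine List.map_congr_left (fun c' _ => ?_)
      rw [pvCnt_append_singleton]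
      have hne : (av == k) = false := by
        simp only [beq_eq_false_iff_ne, ne_eq]
        exact fun heq => hkav heq.symm
      simp [← hav, hne]

lemma pv_loop_inv (attribute_index : Int) (cls : List String) (hnd : cls.Nodup)
    (l : List (List String)) (p : List (List String))
    (hl : ∀ e ∈ l, PySem.List.pyGetD e (-1) "" ∈ cls)
    (D : PySem.Dict String (PySem.Dict String Int)) (h : pvInv attribute_index cls p D) :
    pvInv attribute_index cls (p ++ l)
      (l.foldl (fun avcd ex =>
        (if avcd.contains (PySem.List.pyGetD ex attribute_index "") then avcd
         else avcd.insert (PySem.List.pyGetD ex attribute_index "") (pvInitializeCountingDict cls)).modify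
          (PySem.List.pyGetD ex attribute_index "") PySem.Dict.empty
          (fun cd => pvUpdateCountingDict cd (PySem.List.pyGetD ex (-1) ""))) D) := by
  induction l generalizing p D with
  | nil => simpa using h
  | cons e t ih =>
    simp only [List.foldl_cons]
    have hstep := pv_step_inv attribute_index cls hnd p e (hl e (List.mem_cons_self ..)) D h
    have := ih (p ++ [e]) (fun e' he' => hl e' (List.mem_cons_of_mem _ he')) _ hstep
    simpa [List.append_assoc] using this

-- ===== VERDICT (by name: the statement is the Claim_ definition above) =====
theorem get_attribute_values_counting_dicts_spec : Claim_equal_get_attribute_values_counting_dicts := by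
  intro attribute_index examples _ _
  unfold Spec_get_attribute_values_counting_dicts
  unfold get_attribute_values_counting_dicts get_attribute_values_counting_dicts_alt
  dsimp only
  set cls : List String := PySem.Set.ofList (pvGetClassifications examples) with hcls
  have hnd : cls.Nodup := PySem.Set.nodup_ofList _
  have hl : ∀ e ∈ examples, PySem.List.pyGetD e (-1) "" ∈ cls := by
    intro e he
    rw [hcls, PySem.Set.mem_ofList]
    exact List.mem_map_of_mem he
  obtain ⟨hk, hnod, hin⟩ := pv_loop_inv attribute_index cls hnd examples []
    hl PySem.Dict.empty
    ⟨rfl, PySem.Dict.nodup_keys_empty, by intro k hkm; simp [PySem.Dict.keys_empty] at hkm⟩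
  simp only [List.nil_append] at hk hin
  -- B's two stage-1 folds are first-appearance dedups, i.e. Set.ofList of the mapped lists
  have hvals : examples.foldl (fun (acc : List String) ex_ =>
      let a := PySem.List.pyGetD ex_ attribute_index ""
      if acc.contains a then acc else acc ++ [a]) []
      = PySem.Set.ofList (examples.map (fun e => PySem.List.pyGetD e attribute_index "")) := by
    rw [PySem.Set.ofList_eq_foldl, List.foldl_map]
    rfl
  have hlabs : examples.foldl (fun (acc : List String) ex_ =>
      let c := PySem.List.pyGetD ex_ (-1) ""
      if acc.contains c then acc else acc ++ [c]) [] = cls := by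
    rw [hcls, pvGetClassifications, PySem.Set.ofList_eq_foldl, List.foldl_map]
    rfl
  rw [hvals, hlabs]
  rw [PySem.Dict.items_eq_map_keys _ hnod PySem.Dict.empty, List.map_map, hk]
  refine List.map_congr_left (fun k hkm => ?_)
  simp only [Function.comp]
  have := hin k (hk ▸ hkm)
  rw [this]
  rfl
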